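-- pv_equiv track=rewrite | github.com/Vishal260700/Placement_Codes | Company Codes/SAP_LABS.py | solve
-- ===== SOURCE A (Python) =====
-- parents = {'u' : 'o', 'o' : 'i', 'i' : 'e', 'e' : 'a', 'a' : ''}
--
-- def solve(pointer, string, parent):
--
--     if(pointer >= len(string)):
--         return 0
--
--     if(parent == string[pointer]):
--         return (1 + solve(pointer + 1, string, parent))
--
--     if(string[pointer] in parents):
--         if(parents[string[pointer]] == parent):
--             return max(solve(pointer + 1, string, parent), 1 + solve(pointer + 1, string, string[pointer]))
--         else:
--             return solve(pointer + 1, string, parent)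
--     else:
--         return solve(pointer + 1, string, parent)
-- ===== SOURCE B (Python) =====
-- parents = {'u' : 'o', 'o' : 'i', 'i' : 'e', 'e' : 'a', 'a' : ''}
--
-- def solve(pointer, string, parent):
--     # Right-to-left DP over the scanned index range, keeping for each possible
--     # parent state the best chain length from that point on.
--     n = len(string)
--     states = ['u', 'o', 'i', 'e', 'a', '']
--     if parent not in states:
--         states.append(parent)
--     f = {p: 0 for p in states}
--     for i in reversed(range(pointer, n)):
--         c = string[i]
--         g = {}
--         for p in states:
--             if p == c:
--                 g[p] = 1 + f[p]
--             elif c in parents and parents[c] == p: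
--                 g[p] = max(f[p], 1 + f[c])
--             else:
--                 g[p] = f[p]
--         f = g
--     return f[parent]
-- ===== Notes on version B (the rewrite author's own statement) =====
-- stated objective: faster
-- what changed: Replaced A's branching recursion (which explores both 'keep parent' and 'adopt this vowel' at every matching position, exponential in the worst case) by an iterative right-to-left DP over the same index range, keeping the best chain length for each of the at most 7 reachable parent states; Pre_ excludes pointer < -len(string), where both programs raise IndexError.
import Mathlib
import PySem

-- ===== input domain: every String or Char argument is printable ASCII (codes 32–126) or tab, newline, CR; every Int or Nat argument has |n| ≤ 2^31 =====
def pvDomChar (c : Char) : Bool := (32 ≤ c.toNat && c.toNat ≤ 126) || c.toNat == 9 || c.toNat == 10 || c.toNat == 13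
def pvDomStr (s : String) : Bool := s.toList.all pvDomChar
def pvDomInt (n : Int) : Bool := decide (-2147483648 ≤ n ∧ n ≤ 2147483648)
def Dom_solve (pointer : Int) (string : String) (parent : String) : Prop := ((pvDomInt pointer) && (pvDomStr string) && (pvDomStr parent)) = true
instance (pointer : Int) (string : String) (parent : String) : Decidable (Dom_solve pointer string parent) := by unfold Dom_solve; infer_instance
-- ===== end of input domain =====

-- B replaces A's branching recursion by a right-to-left DP over the ≤ 7 reachable
-- parent states (objective: faster); equivalence is about the return value.

-- ===== PORT A =====
-- the module-level dict 'parents' (1-char-string values kept as List Char)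
def pvParents : List (Char × List Char) :=
  [('u', ['o']), ('o', ['i']), ('i', ['e']), ('e', ['a']), ('a', [])]

-- the recursion of A, on the code-point list (strings compared as List Char);
-- string[pointer] is pyGetD, exact under Pre_solve (outside it Python raises IndexError)
def solveGo (pointer : Int) (cs : List Char) (parent : List Char) : Int :=
  if (cs.length : Int) ≤ pointer then 0
  else
    let c := PySem.List.pyGetD cs pointer default
    if parent = [c] then 1 + solveGo (pointer + 1) cs parent
    else
      match List.lookup c pvParents with
      | some par =>
        if par = parent then
          max (solveGo (pointer + 1) cs parent) (1 + solveGo (pointer + 1) cs [c])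
        else solveGo (pointer + 1) cs parent
      | none => solveGo (pointer + 1) cs parent
termination_by ((cs.length : Int) - pointer).toNat
decreasing_by all_goals omega

def solve (pointer : Int) (string : String) (parent : String) : Int :=
  solveGo pointer string.toList parent.toList

-- ===== PORT B =====
-- states = ['u','o','i','e','a',''] (+ parent if new)
def pvBase : List (List Char) := [['u'], ['o'], ['i'], ['e'], ['a'], []]

def pvStates (parent : List Char) : List (List Char) :=
  if parent ∈ pvBase then pvBase else pvBase ++ [parent]

-- the body of B's inner loop: g[p] for one char c, read off the previous row f
def pvStepVal (f : PySem.Dict (List Char) Int) (c : Char) (p : List Char) : Int :=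
  if p = [c] then 1 + f.getD p 0
  else
    match List.lookup c pvParents with
    | some par => if par = p then max (f.getD p 0) (1 + f.getD [c] 0) else f.getD p 0
    | none => f.getD p 0

-- one iteration of B's outer loop: build the next row g from f
def pvStep (states : List (List Char)) (f : PySem.Dict (List Char) Int) (c : Char) : PySem.Dict (List Char) Int :=
  states.foldl (fun g p => g.insert p (pvStepVal f c p)) PySem.Dict.empty

-- B: fold over reversed(range(pointer, n)); string[i] is pyGetD (exact under Pre_solve)
def solve_alt (pointer : Int) (string : String) (parent : String) : Int :=
  let cs := string.toList
  let n : Int := cs.length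
  let states := pvStates parent.toList
  let f0 := states.foldl (fun d p => d.insert p 0) PySem.Dict.empty
  ((PySem.List.pyRange pointer n 1).reverse.foldl
      (fun f i => pvStep states f (PySem.List.pyGetD cs i default)) f0).getD parent.toList 0

-- ===== PRECONDITION & SPEC =====
-- Pre_ excludes exactly the inputs where both programs raise IndexError:
-- pointer below -len(string) (string[pointer] out of range even after Python's
-- negative-index wraparound).
def Pre_solve (pointer : Int) (string : String) (parent : String) : Prop :=
  -(string.toList.length : Int) ≤ pointer

instance (pointer : Int) (string : String) (parent : String) : Decidable (Pre_solve pointer string parent) := by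
  unfold Pre_solve; infer_instance

def pvWitness_solve : Int × String × String := (0, "ae", "")

def Spec_solve (pointer : Int) (string : String) (parent : String) (out : Int) : Prop := out = solve_alt pointer string parent
instance (pointer : Int) (string : String) (parent : String) (out : Int) : Decidable (Spec_solve pointer string parent out) := by unfold Spec_solve; infer_instance

-- ===== CLAIM (what is proved, stated in full; the proofs are below) =====
def Claim_equal_solve : Prop := ∀ (pointer : Int) (string : String) (parent : String), Dom_solve pointer string parent → Pre_solve pointer string parent → Spec_solve pointer string parent (solve pointer string parent)

-- ===== LEMMAS AND PROOFS =====

-- reference recursion on the effective character sequence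
def solveL : List Char → List Char → Int
  | [], _ => 0
  | c :: rest, parent =>
    if parent = [c] then 1 + solveL rest parent
    else
      match List.lookup c pvParents with
      | some par =>
        if par = parent then max (solveL rest parent) (1 + solveL rest [c])
        else solveL rest parent
      | none => solveL rest parent

-- the sequence of characters A's scan visits from position 'pointer'
def seqOf (pointer : Int) (cs : List Char) : List Char :=
  if (cs.length : Int) ≤ pointer then []
  else if 0 ≤ pointer then cs.drop pointer.toNat
  else cs.drop ((cs.length : Int) + pointer).toNat ++ cs

lemma seqOf_cons (pointer : Int) (cs : List Char)
    (hlo : -(cs.length : Int) ≤ pointer) (hhi : pointer < (cs.length : Int)) :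
    seqOf pointer cs = PySem.List.pyGetD cs pointer default :: seqOf (pointer + 1) cs := by
  by_cases hp : 0 ≤ pointer
  · have hlt : pointer.toNat < cs.length := by omega
    rw [PySem.List.pyGetD_eq_getElem cs default hp hhi]
    rw [seqOf, seqOf, if_neg (by omega), if_pos hp]
    by_cases hend : (cs.length : Int) ≤ pointer + 1
    · rw [if_pos hend, List.drop_eq_getElem_cons hlt]
      have h1 : pointer.toNat + 1 = cs.length := by omega
      simp [h1, List.drop_eq_nil_of_le]
    · rw [if_neg hend, if_pos (by omega), List.drop_eq_getElem_cons hlt]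
      congr 2
      omega
  · -- negative pointer: wraps to index length + pointer
    have hk : ((cs.length : Int) + pointer).toNat < cs.length := by omega
    have hgd : PySem.List.pyGetD cs pointer default = cs[((cs.length : Int) + pointer).toNat] := by
      have hptr : (-(((-pointer).toNat : Nat) : Int)) = pointer := by omega
      conv_lhs => rw [← hptr]
      rw [PySem.List.pyGetD_neg_natCast cs (-pointer).toNat default (by omega) (by omega)]
      have hidx : cs.length - (-pointer).toNat = ((cs.length : Int) + pointer).toNat := by omega
      simp only [hidx]
    rw [hgd, seqOf, seqOf, if_neg (by omega), if_neg hp, if_neg (by omega)]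
    by_cases hz : 0 ≤ pointer + 1
    · -- pointer = -1 : the remaining sequence is the whole string
      rw [if_pos hz, List.drop_eq_getElem_cons hk]
      have h1 : ((cs.length : Int) + pointer).toNat + 1 = cs.length := by omega
      have h2 : (pointer + 1).toNat = 0 := by omega
      rw [h1, h2]
      simp [List.drop_eq_nil_of_le]
    · rw [if_neg hz, List.drop_eq_getElem_cons hk]
      have h1 : ((cs.length : Int) + pointer).toNat + 1 = ((cs.length : Int) + (pointer + 1)).toNat := by omega
      rw [h1, List.cons_append]

lemma solveGo_eq_solveL (cs : List Char) :
    ∀ (fuel : Nat) (pointer : Int) (parent : List Char),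
      ((cs.length : Int) - pointer).toNat ≤ fuel →
      -(cs.length : Int) ≤ pointer →
      solveGo pointer cs parent = solveL (seqOf pointer cs) parent := by
  intro fuel
  induction fuel with
  | zero =>
    intro pointer parent hf hlo
    have hge : (cs.length : Int) ≤ pointer := by omega
    rw [solveGo, if_pos hge, seqOf, if_pos hge, solveL]
  | succ m ih =>
    intro pointer parent hf hlo
    by_cases hge : (cs.length : Int) ≤ pointer
    · rw [solveGo, if_pos hge, seqOf, if_pos hge, solveL]
    · have hhi : pointer < (cs.length : Int) := by omega
      have hseq := seqOf_cons pointer cs hlo hhi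
      rw [solveGo, if_neg hge, hseq, solveL]
      simp only []
      rw [ih (pointer + 1) parent (by omega) (by omega),
          ih (pointer + 1) [PySem.List.pyGetD cs pointer default] (by omega) (by omega)]

-- the index range B iterates, read through string indexing, is exactly seqOf
lemma map_pyRange_eq_seqOf (cs : List Char) :
    ∀ (fuel : Nat) (pointer : Int),
      ((cs.length : Int) - pointer).toNat ≤ fuel →
      -(cs.length : Int) ≤ pointer →
      (PySem.List.pyRange pointer (cs.length : Int) 1).map
        (fun i => PySem.List.pyGetD cs i default) = seqOf pointer cs := by
  intro fuel
  induction fuel with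
  | zero =>
    intro pointer hf hlo
    have hge : (cs.length : Int) ≤ pointer := by omega
    rw [PySem.List.pyRange_one_eq_nil hge, seqOf, if_pos hge, List.map_nil]
  | succ m ih =>
    intro pointer hf hlo
    by_cases hge : (cs.length : Int) ≤ pointer
    · rw [PySem.List.pyRange_one_eq_nil hge, seqOf, if_pos hge, List.map_nil]
    · have hhi : pointer < (cs.length : Int) := by omega
      rw [PySem.List.pyRange_one_cons hhi, List.map_cons,
          ih (pointer + 1) (by omega) (by omega), seqOf_cons pointer cs hlo hhi]

-- a fold inserting a value computed only from the key: lookup of a visited key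
lemma getD_foldl_insert_fun (v : List Char → Int) :
    ∀ (l : List (List Char)) (d : PySem.Dict (List Char) Int) (p : List Char), p ∈ l →
      (l.foldl (fun g q => g.insert q (v q)) d).getD p 0 = v p := by
  intro l
  induction l with
  | nil => intro d p hp; simp at hp
  | cons q t ih =>
    intro d p hp
    by_cases hpt : p ∈ t
    · exact ih _ p hpt
    · rcases List.mem_cons.mp hp with hpq | hmem
      · subst hpq
        rw [List.foldl_cons]
        have preserve : ∀ (t' : List (List Char)) (d' : PySem.Dict (List Char) Int), p ∉ t' →
            (t'.foldl (fun g q => g.insert q (v q)) d').getD p 0 = d'.getD p 0 := by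
          intro t'
          induction t' with
          | nil => intro d' _; rfl
          | cons r t'' ih' =>
            intro d' hnp
            rw [List.foldl_cons, ih' _ (fun h => hnp (List.mem_cons_of_mem _ h))]
            exact PySem.Dict.getD_insert_of_ne d' (v r) 0
              (fun h => hnp (h ▸ List.mem_cons_self ..))
        rw [preserve t _ hpt, PySem.Dict.getD_insert_self]
      · exact absurd hmem hpt

lemma lookup_mem_base {c : Char} {par : List Char} (h : List.lookup c pvParents = some par) :
    [c] ∈ pvBase := by
  simp only [pvParents, List.lookup] at h
  split at h
  · next heq => simp_all [pvBase, (beq_iff_eq ..).mp heq]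
  · split at h
    · next heq => simp_all [pvBase, (beq_iff_eq ..).mp heq]
    · split at h
      · next heq => simp_all [pvBase, (beq_iff_eq ..).mp heq]
      · split at h
        · next heq => simp_all [pvBase, (beq_iff_eq ..).mp heq]
        · split at h
          · next heq => simp_all [pvBase, (beq_iff_eq ..).mp heq]
          · simp at h

lemma base_subset_states (parent : List Char) : pvBase ⊆ pvStates parent := by
  unfold pvStates
  split
  · exact fun _ h => h
  · exact fun x h => List.mem_append_left _ h

lemma parent_mem_states (parent : List Char) : parent ∈ pvStates parent := by
  unfold pvStates
  split
  · assumption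
  · exact List.mem_append_right _ (List.mem_singleton.mpr rfl)

-- main DP invariant: after folding the reversed sequence, entry p holds solveL seq p
lemma dp_invariant (states : List (List Char)) (hbase : pvBase ⊆ states) :
    ∀ (seq : List Char) (p : List Char), p ∈ states →
      (seq.reverse.foldl (pvStep states)
        (states.foldl (fun d q => d.insert q 0) PySem.Dict.empty)).getD p 0 = solveL seq p := by
  intro seq
  induction seq with
  | nil =>
    intro p hp
    rw [List.reverse_nil, List.foldl_nil, solveL]
    exact getD_foldl_insert_fun (fun _ => 0) states _ p hp
  | cons c rest ih =>
    intro p hp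
    rw [List.reverse_cons, List.foldl_append, List.foldl_cons, List.foldl_nil, pvStep,
        getD_foldl_insert_fun _ states _ p hp, pvStepVal, solveL]
    by_cases hpc : p = [c]
    · rw [if_pos hpc, if_pos hpc, ih p hp]
    · rw [if_neg hpc, if_neg hpc]
      cases hl : List.lookup c pvParents with
      | none => simp only []; exact ih p hp
      | some par =>
        have hcs : [c] ∈ states := hbase (lookup_mem_base hl)
        simp only []
        by_cases hpp : par = p
        · rw [if_pos hpp, if_pos hpp, ih p hp, ih [c] hcs]
        · rw [if_neg hpp, if_neg hpp]
          exact ih p hp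

lemma solve_alt_eq_solveL (pointer : Int) (string parent : String)
    (hpre : -(string.toList.length : Int) ≤ pointer) :
    solve_alt pointer string parent = solveL (seqOf pointer string.toList) parent.toList := by
  unfold solve_alt
  simp only []
  rw [← List.foldl_map, List.map_reverse,
      map_pyRange_eq_seqOf string.toList
        (((string.toList.length : Int) - pointer).toNat) pointer (le_refl _) hpre]
  exact dp_invariant _ (base_subset_states parent.toList) _ _ (parent_mem_states parent.toList)

-- ===== VERDICT (by name: the statement is the Claim_ definition above) =====
theorem solve_spec : Claim_equal_solve := by
  intro pointer string parent _ hpre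
  unfold Pre_solve at hpre
  unfold Spec_solve solve
  rw [solveGo_eq_solveL string.toList ((string.toList.length : Int) - pointer).toNat
        pointer parent.toList (le_refl _) hpre,
      solve_alt_eq_solveL pointer string parent hpre]
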